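-- pv_equiv track=rewrite | github.com/DuanyangYuan/M-ER | retrieve_subgraph/retrieve_subgraph_mcts_expand.py | merge_graph
-- ===== SOURCE A (Python) =====
-- from typing import Tuple, List, Any, Dict
--
-- def _reverse_graph(G: Dict[str, List[str]]):
--     r_G = dict()
--     for u in G:
--         for v in G[u]:
--             r_G.setdefault(v, []).append(u)
--     return r_G
--
-- def bfs_graph(G: Dict[str, List[str]], root):
--     visited = set()
--     currentLevel = [root]
--     while currentLevel:
--         for v in currentLevel:
--             visited.add(v)
--         nextLevel = set()
--         for v in currentLevel:
--             for w in G.get(v, []):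
--                 if w not in visited:
--                     nextLevel.add(w)
--         currentLevel = nextLevel
--     return visited
--
-- def merge_graph(graph_l, root_l, graph_r, root_r):
--     assert root_l != root_r
--     all_nodes = set()
--     common_nodes = set(graph_l) & set(graph_r)
--     all_nodes |= common_nodes
--     reverse_graph_l, reverse_graph_r = _reverse_graph(graph_l), _reverse_graph(graph_r)
--     for node in common_nodes:
--         ancestors_l = bfs_graph(reverse_graph_l, node)
--         ancestors_r = bfs_graph(reverse_graph_r, node)
--         descendants_l = bfs_graph(graph_l, node)
--         descendants_r = bfs_graph(graph_r, node)
--         all_nodes.update(ancestors_l)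
--         all_nodes.update(ancestors_r)
--         all_nodes.update(descendants_l)
--         all_nodes.update(descendants_r)
--     return all_nodes
-- ===== SOURCE B (Python) =====
-- def _rev(G):
--     r = {}
--     for u in G:
--         for v in G[u]:
--             r.setdefault(v, []).append(u)
--     return r
--
-- def _sweep(adj, root, seen, out):
--     # grow the persistent closure `seen` by everything reachable from root;
--     # nodes swept for the first time are poured into out
--     if root in seen:
--         return
--     seen.add(root)
--     queue = [root]
--     i = 0
--     while i < len(queue):
--         v = queue[i]
--         i += 1
--         for w in adj.get(v, []):
--             if w not in seen:
--                 seen.add(w)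
--                 queue.append(w)
--     out.update(queue)
--
-- def merge_graph(graph_l, root_l, graph_r, root_r):
--     # incremental multi-source sweep: one persistent visited set per
--     # direction/graph, pruning nodes already swept in that direction
--     assert root_l != root_r
--     common = set(graph_l) & set(graph_r)
--     rev_l, rev_r = _rev(graph_l), _rev(graph_r)
--     out = set(common)
--     seen_al, seen_ar, seen_dl, seen_dr = set(), set(), set(), set()
--     for node in common:
--         _sweep(rev_l, node, seen_al, out)
--         _sweep(rev_r, node, seen_ar, out)
--         _sweep(graph_l, node, seen_dl, out)
--         _sweep(graph_r, node, seen_dr, out)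
--     return out
-- ===== Notes on version B (the rewrite author's own statement) =====
-- stated objective: alternative
-- what changed: Replaces A's independently restarted BFS per common node (4 full traversals each) by an incremental multi-source sweep: one persistent visited set per direction/graph, grown queue-style and pruning every node already swept in an earlier sweep of that direction.
import Mathlib
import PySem

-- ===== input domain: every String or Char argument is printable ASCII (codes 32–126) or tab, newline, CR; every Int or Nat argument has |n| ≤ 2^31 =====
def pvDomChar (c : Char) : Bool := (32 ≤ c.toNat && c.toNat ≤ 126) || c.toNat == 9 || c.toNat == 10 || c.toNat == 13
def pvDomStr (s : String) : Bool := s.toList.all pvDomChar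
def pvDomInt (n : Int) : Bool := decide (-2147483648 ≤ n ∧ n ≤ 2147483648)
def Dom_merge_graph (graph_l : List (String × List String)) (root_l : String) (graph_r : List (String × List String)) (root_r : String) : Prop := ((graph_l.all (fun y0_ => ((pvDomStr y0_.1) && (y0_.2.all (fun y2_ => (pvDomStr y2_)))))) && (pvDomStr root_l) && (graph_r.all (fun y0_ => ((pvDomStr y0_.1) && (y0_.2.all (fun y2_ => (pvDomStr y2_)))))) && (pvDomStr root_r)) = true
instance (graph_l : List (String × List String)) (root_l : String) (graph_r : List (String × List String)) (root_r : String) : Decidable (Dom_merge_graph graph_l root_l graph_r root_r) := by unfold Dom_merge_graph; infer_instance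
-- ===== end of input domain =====

-- B replaces A's independently restarted BFS per common node by an incremental multi-source
-- sweep: one persistent visited set per direction/graph that prunes already-swept nodes
-- (alternative algorithm; not measured faster on a timing run's inputs).

-- ===== PORT A =====
-- fuel for both while-loops: a BFS does at most (#adjacency-list entries + 2) iterations
def pvFuel (adj : PySem.Dict String (List String)) : Nat :=
  (adj.items.flatMap Prod.snd).length + 2

-- shared helper: A's _reverse_graph and B's _rev ('setdefault(v, []).append(u)')
-- transliterate to this same Dict update, so both ports use it
def pvReverse (G : List (String × List String)) : PySem.Dict String (List String) :=
  G.foldl (fun r p =>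
    p.2.foldl (fun r v => r.insert v (r.getD v [] ++ [p.1])) r) PySem.Dict.empty

-- body of A's inner loop: 'if w not in visited: nextLevel.add(w)'
def pvPush (V : PySem.Set String) (nl : PySem.Set String) (w : String) : PySem.Set String :=
  if PySem.Set.contains V w then nl else PySem.Set.add nl w

-- one 'for v in currentLevel' contribution to nextLevel
def pvLevelStep (adj : PySem.Dict String (List String)) (V : PySem.Set String)
    (nl : PySem.Set String) (v : String) : PySem.Set String :=
  (adj.getD v []).foldl (pvPush V) nl

-- A's bfs_graph while-loop, level by level
def bfsLevels (adj : PySem.Dict String (List String)) :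
    Nat → PySem.Set String → List String → PySem.Set String
  | 0, visited, _ => visited
  | fuel+1, visited, cur =>
    match cur with
    | [] => visited
    | c :: cs =>
      let visited' := (c :: cs).foldl PySem.Set.add visited
      bfsLevels adj fuel visited' ((c :: cs).foldl (pvLevelStep adj visited') PySem.Set.empty)

def bfs_graph (adj : PySem.Dict String (List String)) (root : String) : PySem.Set String :=
  bfsLevels adj (pvFuel adj) PySem.Set.empty [root]

def merge_graph (graph_l : List (String × List String)) (root_l : String) (graph_r : List (String × List String)) (root_r : String) : List String :=
  let common := PySem.Set.inter (PySem.Set.ofList (graph_l.map Prod.fst))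
                                (PySem.Set.ofList (graph_r.map Prod.fst))
  let all0 := PySem.Set.union PySem.Set.empty common
  let reverse_graph_l := pvReverse graph_l
  let reverse_graph_r := pvReverse graph_r
  common.foldl (fun all node =>
    let ancestors_l := bfs_graph reverse_graph_l node
    let ancestors_r := bfs_graph reverse_graph_r node
    let descendants_l := bfs_graph (PySem.Dict.mk graph_l) node
    let descendants_r := bfs_graph (PySem.Dict.mk graph_r) node
    PySem.Set.update (PySem.Set.update (PySem.Set.update (PySem.Set.update all
      ancestors_l) ancestors_r) descendants_l) descendants_r) all0

-- ===== PORT B =====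
-- body of B's 'if w not in seen' inside _sweep's queue loop
def pvScan (p : PySem.Set String × List String) (w : String) : PySem.Set String × List String :=
  if PySem.Set.contains p.1 w then p else (PySem.Set.add p.1 w, p.2 ++ [w])

-- B's while-loop inside _sweep: done = queue[:i], todo = queue[i:]; returns (seen, queue)
def bfsQ2 (adj : PySem.Dict String (List String)) :
    Nat → PySem.Set String → List String → List String → PySem.Set String × List String
  | 0, seen, done, todo => (seen, done ++ todo)
  | fuel+1, seen, done, todo =>
    match todo with
    | [] => (seen, done)
    | v :: rest =>
      let st := (adj.getD v []).foldl pvScan (seen, [])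
      bfsQ2 adj fuel st.1 (done ++ [v]) (rest ++ st.2)

-- B's _sweep: grow the persistent closure `seen` from root, pour new nodes into out
def sweep (adj : PySem.Dict String (List String)) (root : String)
    (seen : PySem.Set String) (out : PySem.Set String) :
    PySem.Set String × PySem.Set String :=
  if PySem.Set.contains seen root then (seen, out)
  else
    let p := bfsQ2 adj (pvFuel adj) (PySem.Set.add seen root) [] [root]
    (p.1, PySem.Set.update out p.2)

def merge_graph_alt (graph_l : List (String × List String)) (root_l : String) (graph_r : List (String × List String)) (root_r : String) : List String :=
  let common := PySem.Set.inter (PySem.Set.ofList (graph_l.map Prod.fst))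
                                (PySem.Set.ofList (graph_r.map Prod.fst))
  let rev_l := pvReverse graph_l
  let rev_r := pvReverse graph_r
  let st := common.foldl (fun st node =>
      let p1 := sweep rev_l node st.2.1 st.1
      let p2 := sweep rev_r node st.2.2.1 p1.2
      let p3 := sweep (PySem.Dict.mk graph_l) node st.2.2.2.1 p2.2
      let p4 := sweep (PySem.Dict.mk graph_r) node st.2.2.2.2 p3.2
      (p4.2, p1.1, p2.1, p3.1, p4.1))
    (PySem.Set.ofList common, PySem.Set.empty, PySem.Set.empty, PySem.Set.empty, PySem.Set.empty)
  st.1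

-- ===== PRECONDITION & SPEC =====
-- Pre_ excludes exactly root_l == root_r, where A's 'assert root_l != root_r' raises AssertionError
def Pre_merge_graph (graph_l : List (String × List String)) (root_l : String) (graph_r : List (String × List String)) (root_r : String) : Prop := root_l ≠ root_r
instance (graph_l : List (String × List String)) (root_l : String) (graph_r : List (String × List String)) (root_r : String) : Decidable (Pre_merge_graph graph_l root_l graph_r root_r) := by unfold Pre_merge_graph; infer_instance
def pvWitness_merge_graph : (List (String × List String)) × String × (List (String × List String)) × String :=
  ([("a", ["b", "c"]), ("b", ["c"])], "x", [("b", ["d"]), ("c", [])], "y")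

def Spec_merge_graph (graph_l : List (String × List String)) (root_l : String) (graph_r : List (String × List String)) (root_r : String) (out : List String) : Prop := out = merge_graph_alt graph_l root_l graph_r root_r
instance (graph_l : List (String × List String)) (root_l : String) (graph_r : List (String × List String)) (root_r : String) (out : List String) : Decidable (Spec_merge_graph graph_l root_l graph_r root_r out) := by unfold Spec_merge_graph; infer_instance

-- ===== CLAIM (what is proved, stated in full; the proofs are below) =====
def Claim_equal_merge_graph : Prop := ∀ (graph_l : List (String × List String)) (root_l : String) (graph_r : List (String × List String)) (root_r : String), Dom_merge_graph graph_l root_l graph_r root_r → Pre_merge_graph graph_l root_l graph_r root_r → Spec_merge_graph graph_l root_l graph_r root_r (merge_graph graph_l root_l graph_r root_r)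

-- ===== LEMMAS AND PROOFS =====

lemma set_add_of_mem {s : List String} {x : String} (h : x ∈ s) :
    PySem.Set.add s x = s := by
  simp [PySem.Set.add, h]

lemma set_add_of_not_mem {s : List String} {x : String} (h : x ∉ s) :
    PySem.Set.add s x = s ++ [x] := by
  simp [PySem.Set.add, h]

lemma pvPush_of_mem_V {V nl : List String} {w : String} (h : w ∈ V) :
    pvPush V nl w = nl := by
  simp [pvPush, h]

lemma pvPush_of_mem_nl {V nl : List String} {w : String} (h : w ∈ nl) :
    pvPush V nl w = nl := by
  by_cases hV : w ∈ V
  · simp [pvPush, hV]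
  · simp [pvPush, hV, set_add_of_mem h]

lemma pvPush_of_not_mem {V nl : List String} {w : String} (hV : w ∉ V) (hnl : w ∉ nl) :
    pvPush V nl w = nl ++ [w] := by
  simp [pvPush, hV, set_add_of_not_mem hnl]

lemma pvScan_of_mem {p : PySem.Set String × List String} {w : String} (h : w ∈ p.1) :
    pvScan p w = p := by
  simp [pvScan, h]

lemma pvScan_of_not_mem {p : PySem.Set String × List String} {w : String} (h : w ∉ p.1) :
    pvScan p w = (p.1 ++ [w], p.2 ++ [w]) := by
  simp [pvScan, h, PySem.Set.add, PySem.Set.contains]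

-- membership is preserved and only fresh non-V elements are appended by pvPush
lemma mem_pvPush_mono {V nl : List String} {x : String} (w : String) (h : x ∈ nl) :
    x ∈ pvPush V nl w := by
  by_cases hV : w ∈ V
  · rwa [pvPush_of_mem_V hV]
  · by_cases hnl : w ∈ nl
    · rwa [pvPush_of_mem_nl hnl]
    · rw [pvPush_of_not_mem hV hnl]; exact List.mem_append_left _ h

lemma mem_pvPush_fold_mono (V : List String) (ws : List String) :
    ∀ (nl : List String) (x : String), x ∈ nl → x ∈ ws.foldl (pvPush V) nl := by
  induction ws with
  | nil => intro nl x h; exact h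
  | cons w ws ih => intro nl x h; exact ih _ _ (mem_pvPush_mono w h)

lemma pvPush_fold_complete (V : List String) (ws : List String) :
    ∀ (nl : List String) (w : String), w ∈ ws → w ∈ V ∨ w ∈ ws.foldl (pvPush V) nl := by
  induction ws with
  | nil => intro nl w h; simp at h
  | cons u us ih =>
    intro nl w h
    rcases List.mem_cons.1 h with rfl | h
    · by_cases hV : w ∈ V
      · exact Or.inl hV
      · right
        rw [List.foldl_cons]
        apply mem_pvPush_fold_mono V us
        by_cases hnl : w ∈ nl
        · rwa [pvPush_of_mem_nl hnl]
        · rw [pvPush_of_not_mem hV hnl]; exact List.mem_append_right _ (List.mem_singleton.2 rfl)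
    · exact ih _ w h

-- pvPush-folds append a block of fresh, non-V elements drawn from ws
lemma pvPush_fold_delta (V : List String) (ws : List String) :
    ∀ (nl : List String), ∃ Δ, ws.foldl (pvPush V) nl = nl ++ Δ ∧
      ∀ x ∈ Δ, x ∉ nl ∧ x ∉ V ∧ x ∈ ws := by
  induction ws with
  | nil => intro nl; exact ⟨[], by simp, by simp⟩
  | cons w ws ih =>
    intro nl
    by_cases hV : w ∈ V
    · obtain ⟨Δ, h1, h2⟩ := ih nl
      exact ⟨Δ, by simpa [pvPush_of_mem_V hV] using h1,
        fun x hx => ⟨(h2 x hx).1, (h2 x hx).2.1, List.mem_cons_of_mem _ (h2 x hx).2.2⟩⟩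
    · by_cases hnl : w ∈ nl
      · obtain ⟨Δ, h1, h2⟩ := ih nl
        exact ⟨Δ, by simpa [pvPush_of_mem_nl hnl] using h1,
          fun x hx => ⟨(h2 x hx).1, (h2 x hx).2.1, List.mem_cons_of_mem _ (h2 x hx).2.2⟩⟩
      · obtain ⟨Δ, h1, h2⟩ := ih (nl ++ [w])
        refine ⟨w :: Δ, ?_, ?_⟩
        · rw [List.foldl_cons, pvPush_of_not_mem hV hnl, h1]; simp
        · intro x hx
          rcases List.mem_cons.1 hx with rfl | hx
          · exact ⟨hnl, hV, List.mem_cons_self ..⟩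
          · obtain ⟨ha, hb, hc⟩ := h2 x hx
            refine ⟨fun h => ha (List.mem_append_left _ h), hb, List.mem_cons_of_mem _ hc⟩

lemma mem_level_fold' (adj : PySem.Dict String (List String)) (V : List String)
    (cur : List String) :
    ∀ (nl : List String) (x : String), x ∈ cur.foldl (pvLevelStep adj V) nl →
      x ∈ nl ∨ (x ∉ V ∧ ∃ v ∈ cur, x ∈ adj.getD v []) := by
  induction cur with
  | nil => intro nl x h; exact Or.inl h
  | cons v rest ih =>
    intro nl x h
    rcases ih (pvLevelStep adj V nl v) x h with h' | ⟨hV, u, hu, hx⟩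
    · obtain ⟨Δ, h1, h2⟩ := pvPush_fold_delta V (adj.getD v []) nl
      rw [pvLevelStep, h1] at h'
      rcases List.mem_append.1 h' with h'' | h''
      · exact Or.inl h''
      · obtain ⟨_, hb, hc⟩ := h2 x h''
        exact Or.inr ⟨hb, v, List.mem_cons_self .., hc⟩
    · exact Or.inr ⟨hV, u, List.mem_cons_of_mem _ hu, hx⟩

lemma mem_level_fold_mono (adj : PySem.Dict String (List String)) (V : List String)
    (cur : List String) :
    ∀ (nl : List String) (x : String), x ∈ nl → x ∈ cur.foldl (pvLevelStep adj V) nl := by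
  induction cur with
  | nil => intro nl x h; exact h
  | cons v rest ih =>
    intro nl x h
    exact ih _ _ (mem_pvPush_fold_mono V _ _ _ h)

lemma level_fold_complete (adj : PySem.Dict String (List String)) (V : List String)
    (cur : List String) :
    ∀ (nl : List String) (v : String), v ∈ cur → ∀ w ∈ adj.getD v [],
      w ∈ V ∨ w ∈ cur.foldl (pvLevelStep adj V) nl := by
  induction cur with
  | nil => intro nl v h; simp at h
  | cons u rest ih =>
    intro nl v hv w hw
    rcases List.mem_cons.1 hv with rfl | hv
    · rcases pvPush_fold_complete V (adj.getD v []) nl w hw with h | h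
      · exact Or.inl h
      · exact Or.inr (mem_level_fold_mono adj V rest _ w h)
    · exact ih _ v hv w hw

lemma nodup_pvPush {V nl : List String} {w : String} (h : nl.Nodup) : (pvPush V nl w).Nodup := by
  by_cases hV : w ∈ V
  · rwa [pvPush_of_mem_V hV]
  · by_cases hnl : w ∈ nl
    · rwa [pvPush_of_mem_nl hnl]
    · rw [pvPush_of_not_mem hV hnl]
      exact h.append (List.nodup_singleton w) (by simpa [List.disjoint_right] using hnl)

lemma nodup_pvPush_fold (V : List String) (ws : List String) :
    ∀ (nl : List String), nl.Nodup → (ws.foldl (pvPush V) nl).Nodup := by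
  induction ws with
  | nil => intro nl h; exact h
  | cons w ws ih => intro nl h; exact ih _ (nodup_pvPush h)

lemma getD_sub (adj : PySem.Dict String (List String)) (v x : String)
    (h : x ∈ adj.getD v []) : x ∈ adj.items.flatMap Prod.snd := by
  unfold PySem.Dict.getD PySem.Dict.get? at h
  cases hf : List.find? (fun p => p.1 == v) adj.items with
  | none => rw [hf] at h; simp at h
  | some p =>
    rw [hf] at h
    simp only [Option.map_some, Option.getD_some] at h
    exact List.mem_flatMap.2 ⟨p, List.mem_of_find?_eq_some hf, h⟩

lemma nodup_level_fold (adj : PySem.Dict String (List String)) (V : List String) (cur : List String) :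
    ∀ (nl : List String), nl.Nodup → (cur.foldl (pvLevelStep adj V) nl).Nodup := by
  induction cur with
  | nil => intro nl h; exact h
  | cons v rest ih => intro nl h; exact ih _ (nodup_pvPush_fold V _ _ h)

lemma foldl_add_fresh :
    ∀ (cur visited : List String), cur.Nodup → (∀ x ∈ cur, x ∉ visited) →
    cur.foldl PySem.Set.add visited = visited ++ cur := by
  intro cur
  induction cur with
  | nil => intro visited _ _; simp
  | cons c cs ih =>
    intro visited hnd hfresh
    have hc : c ∉ visited := hfresh c (List.mem_cons_self ..)
    have h1 : PySem.Set.add visited c = visited ++ [c] := set_add_of_not_mem hc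
    have h2 : ∀ x ∈ cs, x ∉ visited ++ [c] := by
      intro x hx
      simp only [List.mem_append, List.mem_singleton]
      rintro (h | rfl)
      · exact hfresh x (List.mem_cons_of_mem _ hx) h
      · exact (List.nodup_cons.1 hnd).1 hx
    rw [List.foldl_cons, h1, ih _ (List.nodup_cons.1 hnd).2 h2, List.append_assoc]
    rfl

-- the fresh-node budget a BFS state still has
def pvK (adj : PySem.Dict String (List String)) (l : List String) : Nat :=
  ((adj.items.flatMap Prod.snd).toFinset \ l.toFinset).card

lemma pvK_drop (adj : PySem.Dict String (List String)) {l next : List String}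
    (hnd : next.Nodup) (hfresh : ∀ x ∈ next, x ∉ l)
    (hval : ∀ x ∈ next, x ∈ adj.items.flatMap Prod.snd) :
    pvK adj l = pvK adj (l ++ next) + next.length := by
  unfold pvK
  have hsub : next.toFinset ⊆ (adj.items.flatMap Prod.snd).toFinset \ l.toFinset := by
    intro x hx
    rw [List.mem_toFinset] at hx
    rw [Finset.mem_sdiff, List.mem_toFinset, List.mem_toFinset]
    exact ⟨hval x hx, hfresh x hx⟩
  have h1 : ((adj.items.flatMap Prod.snd).toFinset \ l.toFinset) \ next.toFinset
      = (adj.items.flatMap Prod.snd).toFinset \ (l ++ next).toFinset := by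
    rw [List.toFinset_append]; ext x; simp [Finset.mem_sdiff]; tauto
  have h2 : (((adj.items.flatMap Prod.snd).toFinset \ l.toFinset) \ next.toFinset).card
      = ((adj.items.flatMap Prod.snd).toFinset \ l.toFinset).card - next.toFinset.card := by
    rw [Finset.card_sdiff, Finset.inter_eq_left.2 hsub]
  have h3 := Finset.card_le_card hsub
  have h4 : next.toFinset.card = next.length := List.toFinset_card_of_nodup hnd
  rw [h1] at h2
  omega

-- predicate: w survives the prune against the ambient seen set S
def pvOut (S : List String) (w : String) : Bool := decide (w ∉ S)

-- S is closed under adjacency: everything reachable from S is already in S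
def pvClosed (adj : PySem.Dict String (List String)) (S : List String) : Prop :=
  ∀ v ∈ S, ∀ w ∈ adj.getD v [], w ∈ S

-- the inner scans agree up to pruning by S
lemma pvInnerS (S V : List String) (ws : List String) :
    ∀ (nl seen : List String) (acc : List String),
    (∀ w, w ∈ seen ↔ w ∈ S ∨ w ∈ V ∨ w ∈ nl) →
    ∃ Δ, ws.foldl (pvPush V) nl = nl ++ Δ
      ∧ (ws.foldl pvScan (seen, acc)).2 = acc ++ Δ.filter (pvOut S)
      ∧ (∀ w, w ∈ (ws.foldl pvScan (seen, acc)).1 ↔ w ∈ S ∨ w ∈ V ∨ w ∈ nl ++ Δ) := by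
  induction ws with
  | nil =>
    intro nl seen acc hs
    exact ⟨[], by simp, by simp, by simpa using hs⟩
  | cons w ws ih =>
    intro nl seen acc hs
    by_cases hw : w ∈ seen
    · have h1 : pvScan (seen, acc) w = (seen, acc) := pvScan_of_mem hw
      by_cases hkeep : w ∈ V ∨ w ∈ nl
      · have h2 : pvPush V nl w = nl := by
          rcases hkeep with h | h
          · exact pvPush_of_mem_V h
          · exact pvPush_of_mem_nl h
        obtain ⟨Δ, e1, e2, e3⟩ := ih nl seen acc hs
        exact ⟨Δ, by simpa [List.foldl_cons, h1, h2] using e1,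
          by simpa [List.foldl_cons, h1] using e2,
          by simpa [List.foldl_cons, h1] using e3⟩
      · rw [not_or] at hkeep
        have hS : w ∈ S := by
          rcases (hs w).1 hw with h | h | h
          · exact h
          · exact absurd h hkeep.1
          · exact absurd h hkeep.2
        have h2 : pvPush V nl w = nl ++ [w] := pvPush_of_not_mem hkeep.1 hkeep.2
        have hs' : ∀ x, x ∈ seen ↔ x ∈ S ∨ x ∈ V ∨ x ∈ nl ++ [w] := by
          intro x
          have h0 := hs x
          constructor
          · intro hx; rcases h0.1 hx with h | h | h
            · exact Or.inl h
            · exact Or.inr (Or.inl h)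
            · exact Or.inr (Or.inr (List.mem_append_left _ h))
          · rintro (h | h | h)
            · exact h0.2 (Or.inl h)
            · exact h0.2 (Or.inr (Or.inl h))
            · rcases List.mem_append.1 h with h | h
              · exact h0.2 (Or.inr (Or.inr h))
              · rw [List.mem_singleton.1 h]; exact hw
        obtain ⟨Δ, e1, e2, e3⟩ := ih (nl ++ [w]) seen acc hs'
        refine ⟨w :: Δ, ?_, ?_, ?_⟩
        · rw [List.foldl_cons, h2, e1, List.append_assoc]; rfl
        · rw [List.foldl_cons, h1, e2]
          have hout : pvOut S w = false := by simp [pvOut, hS]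
          simp [hout]
        · intro x
          have hcons : nl ++ w :: Δ = nl ++ [w] ++ Δ := by simp
          rw [hcons, List.foldl_cons, h1]; exact e3 x
    · have hS : w ∉ S := fun h => hw ((hs w).2 (Or.inl h))
      have hV : w ∉ V := fun h => hw ((hs w).2 (Or.inr (Or.inl h)))
      have hnl : w ∉ nl := fun h => hw ((hs w).2 (Or.inr (Or.inr h)))
      have h1 : pvScan (seen, acc) w = (seen ++ [w], acc ++ [w]) := pvScan_of_not_mem hw
      have h2 : pvPush V nl w = nl ++ [w] := pvPush_of_not_mem hV hnl
      have hs' : ∀ x, x ∈ seen ++ [w] ↔ x ∈ S ∨ x ∈ V ∨ x ∈ nl ++ [w] := by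
        intro x
        have := hs x
        simp only [List.mem_append, List.mem_singleton] at this ⊢
        tauto
      obtain ⟨Δ, e1, e2, e3⟩ := ih (nl ++ [w]) (seen ++ [w]) (acc ++ [w]) hs'
      refine ⟨w :: Δ, ?_, ?_, ?_⟩
      · rw [List.foldl_cons, h2, e1, List.append_assoc]; rfl
      · rw [List.foldl_cons, h1, e2]
        have hout : pvOut S w = true := by simp [pvOut, hS]
        simp [hout]
      · intro x
        have hcons : nl ++ w :: Δ = nl ++ [w] ++ Δ := by simp
        rw [hcons, List.foldl_cons, h1]; exact e3 x

-- a level-closed fold by an S-parent only adds S-elements: its pruned image is unchanged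
lemma levelstep_S {adj : PySem.Dict String (List String)} {S : List String}
    (hS : pvClosed adj S) (V nl : List String) {v : String} (hv : v ∈ S) :
    ∃ Δ, pvLevelStep adj V nl v = nl ++ Δ ∧ ∀ x ∈ Δ, x ∉ nl ∧ x ∈ S := by
  obtain ⟨Δ, h1, h2⟩ := pvPush_fold_delta V (adj.getD v []) nl
  exact ⟨Δ, h1, fun x hx => ⟨(h2 x hx).1, hS v hv x (h2 x hx).2.2⟩⟩

-- B's queue loop run across one whole level equals A's level step, pruned by S
lemma pvBlockS (adj : PySem.Dict String (List String)) {S : List String}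
    (hS : pvClosed adj S) (V : List String) :
    ∀ (cur : List String) (fQ : Nat) (seen done nlA : List String),
    (∀ w, w ∈ seen ↔ w ∈ S ∨ w ∈ V ∨ w ∈ nlA) →
    ∃ seen' : List String,
      (∀ w, w ∈ seen' ↔ w ∈ S ∨ w ∈ V ∨ w ∈ cur.foldl (pvLevelStep adj V) nlA) ∧
      bfsQ2 adj ((cur.filter (pvOut S)).length + fQ) seen done
          (cur.filter (pvOut S) ++ nlA.filter (pvOut S))
        = bfsQ2 adj fQ seen' (done ++ cur.filter (pvOut S))
            ((cur.foldl (pvLevelStep adj V) nlA).filter (pvOut S)) := by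
  intro cur
  induction cur with
  | nil =>
    intro fQ seen done nlA hs
    exact ⟨seen, by simpa using hs, by simp⟩
  | cons v rest ih =>
    intro fQ seen done nlA hs
    by_cases hv : v ∈ S
    · -- pruned: A's level step over v adds only S-elements
      obtain ⟨Δ, h1, h2⟩ := levelstep_S hS V nlA hv
      have hfilter : (pvLevelStep adj V nlA v).filter (pvOut S) = nlA.filter (pvOut S) := by
        rw [h1, List.filter_append]
        have : Δ.filter (pvOut S) = [] := by
          rw [List.filter_eq_nil_iff]
          intro x hx
          simp [pvOut, (h2 x hx).2]
        rw [this, List.append_nil]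
      have hs' : ∀ w, w ∈ seen ↔ w ∈ S ∨ w ∈ V ∨ w ∈ pvLevelStep adj V nlA v := by
        intro w
        rw [h1]
        constructor
        · intro hw; rcases (hs w).1 hw with h | h | h
          · exact Or.inl h
          · exact Or.inr (Or.inl h)
          · exact Or.inr (Or.inr (List.mem_append_left _ h))
        · rintro (h | h | h)
          · exact (hs w).2 (Or.inl h)
          · exact (hs w).2 (Or.inr (Or.inl h))
          · rcases List.mem_append.1 h with h | h
            · exact (hs w).2 (Or.inr (Or.inr h))
            · exact (hs w).2 (Or.inl (h2 w h).2)
      obtain ⟨seen', e1, e2⟩ := ih fQ seen done (pvLevelStep adj V nlA v) hs'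
      have hvf : pvOut S v = false := by simp [pvOut, hv]
      refine ⟨seen', by simpa [List.foldl_cons] using e1, ?_⟩
      simpa [List.filter_cons, hvf, hfilter] using e2
    · -- kept: one queue step scans adj[v]
      have hvt : pvOut S v = true := by simp [pvOut, hv]
      obtain ⟨Δ, e1, e2, e3⟩ := pvInnerS S V (adj.getD v []) nlA seen [] (by simpa using hs)
      have hstep :
          bfsQ2 adj (((v :: rest).filter (pvOut S)).length + fQ) seen done
              ((v :: rest).filter (pvOut S) ++ nlA.filter (pvOut S))
            = bfsQ2 adj ((rest.filter (pvOut S)).length + fQ)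
                ((adj.getD v []).foldl pvScan (seen, [])).1 (done ++ [v])
                (rest.filter (pvOut S) ++ (pvLevelStep adj V nlA v).filter (pvOut S)) := by
        rw [List.filter_cons, hvt]
        simp only [if_pos]
        have hlen : (v :: rest.filter (pvOut S)).length + fQ
            = (rest.filter (pvOut S)).length + fQ + 1 := by
          simp [Nat.add_assoc, Nat.add_comm]
        rw [hlen]
        show bfsQ2 adj ((rest.filter (pvOut S)).length + fQ + 1) seen done
            (v :: (rest.filter (pvOut S) ++ nlA.filter (pvOut S))) = _
        simp only [bfsQ2]
        rw [e2, pvLevelStep, e1, List.filter_append]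
        simp [List.append_assoc]
      have hs1 : ∀ w, w ∈ ((adj.getD v []).foldl pvScan (seen, ([] : List String))).1
          ↔ w ∈ S ∨ w ∈ V ∨ w ∈ pvLevelStep adj V nlA v := by
        intro w
        rw [pvLevelStep, e1]
        exact e3 w
      obtain ⟨seen', f1, f2⟩ :=
        ih fQ ((adj.getD v []).foldl pvScan (seen, [])).1 (done ++ [v]) (pvLevelStep adj V nlA v) hs1
      refine ⟨seen', by simpa [List.foldl_cons] using f1, ?_⟩
      rw [hstep, f2]
      simp [hvt, List.append_assoc]

-- membership in A's 'for v in currentLevel: visited.add(v)' fold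
lemma mem_foldl_set_add (cur : List String) :
    ∀ (visited : List String) (x : String),
    x ∈ cur.foldl PySem.Set.add visited ↔ x ∈ visited ∨ x ∈ cur := by
  induction cur with
  | nil => intro visited x; simp
  | cons c cs ih =>
    intro visited x
    rw [List.foldl_cons, ih]
    rw [show PySem.Set.add visited c = if c ∈ visited then visited else visited ++ [c]
        from PySem.Set.add_eq_ite visited c]
    split_ifs with h
    · simp only [List.mem_cons]
      constructor
      · rintro (h' | h'); exacts [Or.inl h', Or.inr (Or.inr h')]
      · rintro (h' | rfl | h'); exacts [Or.inl h', Or.inl h, Or.inr h']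
    · simp only [List.mem_append, List.mem_cons]
      tauto

-- the whole BFS: A's level loop vs B's pruned queue loop, in lockstep
lemma pvMain (adj : PySem.Dict String (List String)) {S : List String}
    (hS : pvClosed adj S) :
    ∀ (fL : Nat) (visited cur : List String) (fQ : Nat) (seen done : List String),
    cur.Nodup → (∀ x ∈ cur, x ∉ visited) →
    (∀ v ∈ visited, ∀ w ∈ adj.getD v [], w ∈ visited ++ cur) →
    (∀ w, w ∈ seen ↔ w ∈ S ∨ w ∈ visited ++ cur) →
    pvK adj (visited ++ cur) + 2 ≤ fL →
    (cur.filter (pvOut S)).length + pvK adj (visited ++ cur) + 1 ≤ fQ →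
    ∃ tail seenF,
      bfsLevels adj fL visited cur = visited ++ tail
      ∧ bfsQ2 adj fQ seen done (cur.filter (pvOut S)) = (seenF, done ++ tail.filter (pvOut S))
      ∧ (∀ w, w ∈ seenF ↔ w ∈ S ∨ w ∈ visited ++ tail)
      ∧ (∀ v ∈ visited ++ tail, ∀ w ∈ adj.getD v [], w ∈ visited ++ tail) := by
  intro fL
  induction fL with
  | zero => intro visited cur fQ seen done _ _ _ _ hfL _; omega
  | succ fL ih =>
    intro visited cur fQ seen done hnd hfresh hvis hseen hfL hfQ
    cases cur with
    | nil =>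
      obtain ⟨fQ', rfl⟩ : ∃ m, fQ = m + 1 := ⟨fQ - 1, by omega⟩
      refine ⟨[], seen, ?_, ?_, ?_, ?_⟩
      · simp [bfsLevels]
      · simp [bfsQ2]
      · intro w; simpa using hseen w
      · intro v hv w hw; simpa using hvis v (by simpa using hv) w hw
    | cons c cs =>
      have hvis' : (c :: cs).foldl PySem.Set.add visited = visited ++ (c :: cs) :=
        foldl_add_fresh _ _ hnd hfresh
      set V := visited ++ (c :: cs) with hV
      set next := (c :: cs).foldl (pvLevelStep adj V) [] with hnext
      have hLstep : bfsLevels adj (fL + 1) visited (c :: cs) = bfsLevels adj fL V next := by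
        simp only [bfsLevels]
        rw [hvis']
        rfl
      have hvisV : ∀ v ∈ V, ∀ w ∈ adj.getD v [], w ∈ V ++ next := by
        intro v hv w hw
        rcases List.mem_append.1 hv with hv | hv
        · exact List.mem_append_left _ (hvis v hv w hw)
        · rcases level_fold_complete adj V (c :: cs) [] v hv w hw with h | h
          · exact List.mem_append_left _ h
          · exact List.mem_append_right _ h
      have hndN : next.Nodup := nodup_level_fold adj _ _ _ List.nodup_nil
      have hfrN : ∀ x ∈ next, x ∉ V := by
        intro x hx
        rcases mem_level_fold' adj V (c :: cs) [] x hx with h | ⟨h, _⟩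
        · simp at h
        · exact h
      have hvalN : ∀ x ∈ next, x ∈ adj.items.flatMap Prod.snd := by
        intro x hx
        rcases mem_level_fold' adj V (c :: cs) [] x hx with h | ⟨_, v, _, hc⟩
        · simp at h
        · exact getD_sub adj v x hc
      -- run the queue across this level
      obtain ⟨fQ', hfQeq⟩ : ∃ m, fQ = ((c :: cs).filter (pvOut S)).length + m := by
        refine ⟨fQ - ((c :: cs).filter (pvOut S)).length, ?_⟩
        have := List.length_filter_le (pvOut S) (c :: cs)
        omega
      obtain ⟨seen₁, g1, g2⟩ := pvBlockS adj hS V (c :: cs) fQ' seen done []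
        (by intro w; simpa using hseen w)
      simp only [List.filter_nil, List.append_nil] at g2
      have hseen₁ : ∀ w, w ∈ seen₁ ↔ w ∈ S ∨ w ∈ V ++ next := by
        intro w
        rw [List.mem_append]
        constructor
        · intro hw; rcases (g1 w).1 hw with h | h | h
          · exact Or.inl h
          · exact Or.inr (Or.inl h)
          · exact Or.inr (Or.inr h)
        · rintro (h | h | h)
          · exact (g1 w).2 (Or.inl h)
          · exact (g1 w).2 (Or.inr (Or.inl h))
          · exact (g1 w).2 (Or.inr (Or.inr h))
      have hdrop := pvK_drop adj (l := V) (next := next) hndN hfrN hvalN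
      cases hnextc : next with
      | nil =>
        obtain ⟨a, rfl⟩ : ∃ m, fL = m + 1 := ⟨fL - 1, by omega⟩
        obtain ⟨b, rfl⟩ : ∃ m, fQ' = m + 1 := by
          refine ⟨fQ' - 1, ?_⟩
          have := hfQeq ▸ hfQ
          omega
        refine ⟨c :: cs, seen₁, ?_, ?_, ?_, ?_⟩
        · rw [hLstep, hnextc]
          simp [bfsLevels]
          exact hV
        · rw [hfQeq, g2, ← hnext, hnextc]
          simp [bfsQ2]
        · intro w
          have h := hseen₁ w
          rw [hnextc, List.append_nil, hV] at h
          exact h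
        · intro v hv w hw
          rw [← hV] at hv
          have h := hvisV v hv w hw
          rw [hnextc, List.append_nil, hV] at h
          exact h
      | cons n ns =>
        have hlenN : 1 ≤ next.length := by rw [hnextc]; simp
        have hfLih : pvK adj (V ++ next) + 2 ≤ fL := by omega
        have hfQih : (next.filter (pvOut S)).length + pvK adj (V ++ next) + 1 ≤ fQ' := by
          have h1 := List.length_filter_le (pvOut S) next
          have h2 : ((c :: cs).filter (pvOut S)).length + fQ' = fQ := hfQeq.symm
          have h3 := List.length_filter_le (pvOut S) (c :: cs)
          omega
        obtain ⟨tail, seenF, e1, e2, e3, e4⟩ :=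
          ih V next fQ' seen₁ (done ++ (c :: cs).filter (pvOut S)) hndN hfrN hvisV hseen₁ hfLih hfQih
        refine ⟨(c :: cs) ++ tail, seenF, ?_, ?_, ?_, ?_⟩
        · rw [hLstep, e1, hV, List.append_assoc]
        · rw [hfQeq, g2, e2, List.filter_append, List.append_assoc]
        · intro w
          rw [← List.append_assoc, ← hV]
          exact e3 w
        · intro v hv w hw
          rw [← List.append_assoc, ← hV] at hv ⊢
          exact e4 v hv w hw

-- a BFS started inside a closed S never leaves S
lemma bfsLevels_subset (adj : PySem.Dict String (List String)) {S : List String}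
    (hS : pvClosed adj S) :
    ∀ (fL : Nat) (visited cur : List String),
    (∀ x ∈ visited, x ∈ S) → (∀ x ∈ cur, x ∈ S) →
    ∀ x ∈ bfsLevels adj fL visited cur, x ∈ S := by
  intro fL
  induction fL with
  | zero => intro visited cur hv _ x hx; exact hv x hx
  | succ fL ih =>
    intro visited cur hv hc x hx
    cases cur with
    | nil => exact hv x hx
    | cons c cs =>
      simp only [bfsLevels] at hx
      refine ih _ _ ?_ ?_ x hx
      · intro y hy
        rcases (mem_foldl_set_add (c :: cs) visited y).1 hy with h | h
        · exact hv y h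
        · exact hc y h
      · intro y hy
        rcases mem_level_fold' adj _ (c :: cs) _ y hy with h | ⟨_, v, hv', hy'⟩
        · simp [PySem.Set.empty] at h
        · exact hS v (hc v hv') y hy'

-- updating with a sublist of the target changes nothing
lemma update_of_subset (out xs : List String) (h : ∀ x ∈ xs, x ∈ out) :
    PySem.Set.update out xs = out := by
  rw [PySem.Set.update_eq_append_filter]
  have : (PySem.Set.ofList xs).filter (fun y => !(PySem.Set.contains out y)) = [] := by
    rw [List.filter_eq_nil_iff]
    intro a ha
    have hao : a ∈ out := h a ((PySem.Set.mem_ofList _ _).1 ha)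
    simp
    exact hao
  rw [this, List.append_nil]

-- elements already present may be dropped before updating
lemma update_filter_congr (S : List String) (xs : List String) :
    ∀ (out : List String), (∀ x ∈ xs, x ∈ S → x ∈ out) →
    PySem.Set.update out xs = PySem.Set.update out (xs.filter (pvOut S)) := by
  induction xs with
  | nil => intro out _; rfl
  | cons x xs ih =>
    intro out h
    rw [PySem.Set.update_cons, List.filter_cons]
    by_cases hx : x ∈ S
    · have hxo : x ∈ out := h x (List.mem_cons_self ..) hx
      rw [set_add_of_mem hxo]
      have : pvOut S x = false := by simp [pvOut, hx]
      rw [this]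
      simp only [Bool.false_eq_true, if_false]
      exact ih out (fun y hy => h y (List.mem_cons_of_mem _ hy))
    · have : pvOut S x = true := by simp [pvOut, hx]
      rw [this]
      simp only [if_true]
      rw [PySem.Set.update_cons]
      exact ih (PySem.Set.add out x) (fun y hy hyS =>
        (PySem.Set.mem_add _ _ _).2 (Or.inl (h y (List.mem_cons_of_mem _ hy) hyS)))

lemma mem_update_left {out xs : List String} {x : String} (h : x ∈ out) :
    x ∈ PySem.Set.update out xs := (PySem.Set.mem_update _ _ _).2 (Or.inl h)

-- the per-direction step: A's full restarted BFS update equals B's pruned sweep,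
-- and the sweep's persistent seen set stays closed and inside out
lemma sweep_spec (adj : PySem.Dict String (List String)) (S out : List String) (c : String)
    (hS : pvClosed adj S) (hSo : ∀ x ∈ S, x ∈ out) :
    PySem.Set.update out (bfs_graph adj c) = (sweep adj c S out).2
    ∧ pvClosed adj (sweep adj c S out).1
    ∧ (∀ x ∈ (sweep adj c S out).1, x ∈ (sweep adj c S out).2)
    ∧ (∀ x ∈ out, x ∈ (sweep adj c S out).2) := by
  by_cases hc : c ∈ S
  · have hcon : PySem.Set.contains S c = true := (PySem.Set.contains_iff _ _).2 hc
    have hsw : sweep adj c S out = (S, out) := by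
      unfold sweep
      rw [hcon]
      simp
    rw [hsw]
    refine ⟨?_, hS, hSo, fun x hx => hx⟩
    apply update_of_subset
    intro x hx
    exact hSo x (bfsLevels_subset adj hS (pvFuel adj) [] [c] (by simp) (by simpa using hc) x hx)
  · have hcon : PySem.Set.contains S c = false := by
      rw [← Bool.not_eq_true]
      intro h
      exact hc ((PySem.Set.contains_iff _ _).1 h)
    have hsw : sweep adj c S out
        = (let p := bfsQ2 adj (pvFuel adj) (PySem.Set.add S c) [] [c]
           (p.1, PySem.Set.update out p.2)) := by
      unfold sweep
      rw [hcon]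
      simp
    have hct : pvOut S c = true := by simp [pvOut, hc]
    have hK : pvK adj ([] ++ [c]) ≤ (adj.items.flatMap Prod.snd).length :=
      le_trans (Finset.card_le_card Finset.sdiff_subset) (List.toFinset_card_le _)
    obtain ⟨tail, seenF, e1, e2, e3, e4⟩ := pvMain adj hS (pvFuel adj) [] [c] (pvFuel adj)
      (PySem.Set.add S c) []
      (by simp) (by simp) (by simp)
      (by intro w
          rw [PySem.Set.mem_add]
          simp)
      (by unfold pvFuel; omega)
      (by simp only [List.filter_cons, hct, if_true, List.filter_nil, List.length_cons,
            List.length_nil]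
          unfold pvFuel
          omega)
    have hfc : ([c].filter (pvOut S)) = [c] := by simp [hct]
    rw [hfc] at e2
    simp only [List.nil_append] at e1 e3 e4
    have hq : bfsQ2 adj (pvFuel adj) (PySem.Set.add S c) [] [c] = (seenF, tail.filter (pvOut S)) := by
      simpa using e2
    have hbfs : bfs_graph adj c = tail := by
      unfold bfs_graph
      exact e1
    rw [hsw]
    simp only [hq]
    refine ⟨?_, ?_, ?_, ?_⟩
    · rw [hbfs]
      exact update_filter_congr S tail out (fun x _ hxS => hSo x hxS)
    · intro v hv w hw
      rcases (e3 v).1 hv with h | h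
      · exact (e3 w).2 (Or.inl (hS v h w hw))
      · exact (e3 w).2 (Or.inr (e4 v h w hw))
    · intro x hx
      rcases (e3 x).1 hx with h | h
      · exact mem_update_left (hSo x h)
      · by_cases hxS : x ∈ S
        · exact mem_update_left (hSo x hxS)
        · refine (PySem.Set.mem_update _ _ _).2 (Or.inr ?_)
          rw [List.mem_filter]
          exact ⟨h, by simp [pvOut, hxS]⟩
    · intro x hx
      exact mem_update_left hx

-- set(xs) as Python writes 'set() | xs'
lemma union_empty_left (t : List String) :
    PySem.Set.union PySem.Set.empty t = PySem.Set.ofList t := rfl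

-- the outer loop over the common nodes, all four directions in lockstep
lemma pvFold (a1 a2 a3 a4 : PySem.Dict String (List String)) :
    ∀ (c : List String) (all s1 s2 s3 s4 : List String),
    pvClosed a1 s1 → pvClosed a2 s2 → pvClosed a3 s3 → pvClosed a4 s4 →
    (∀ x ∈ s1, x ∈ all) → (∀ x ∈ s2, x ∈ all) → (∀ x ∈ s3, x ∈ all) → (∀ x ∈ s4, x ∈ all) →
    (c.foldl (fun st node =>
        let p1 := sweep a1 node st.2.1 st.1
        let p2 := sweep a2 node st.2.2.1 p1.2
        let p3 := sweep a3 node st.2.2.2.1 p2.2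
        let p4 := sweep a4 node st.2.2.2.2 p3.2
        (p4.2, p1.1, p2.1, p3.1, p4.1)) (all, s1, s2, s3, s4)).1
      = c.foldl (fun all node =>
          PySem.Set.update (PySem.Set.update (PySem.Set.update (PySem.Set.update all
            (bfs_graph a1 node)) (bfs_graph a2 node)) (bfs_graph a3 node)) (bfs_graph a4 node))
          all := by
  intro c
  induction c with
  | nil => intro all s1 s2 s3 s4 _ _ _ _ _ _ _ _; rfl
  | cons node rest ih =>
    intro all s1 s2 s3 s4 hc1 hc2 hc3 hc4 ho1 ho2 ho3 ho4
    obtain ⟨u1, d1, i1, m1⟩ := sweep_spec a1 s1 all node hc1 ho1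
    obtain ⟨u2, d2, i2, m2⟩ := sweep_spec a2 s2 (sweep a1 node s1 all).2 node hc2
      (fun x hx => m1 x (ho2 x hx))
    obtain ⟨u3, d3, i3, m3⟩ := sweep_spec a3 s3 (sweep a2 node s2 (sweep a1 node s1 all).2).2 node
      hc3 (fun x hx => m2 x (m1 x (ho3 x hx)))
    obtain ⟨u4, d4, i4, m4⟩ := sweep_spec a4 s4
      (sweep a3 node s3 (sweep a2 node s2 (sweep a1 node s1 all).2).2).2 node
      hc4 (fun x hx => m3 x (m2 x (m1 x (ho4 x hx))))
    simp only [List.foldl_cons]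
    rw [u1, u2, u3, u4]
    exact ih _ _ _ _ _ d1 d2 d3 d4
      (fun x hx => m4 x (m3 x (m2 x (i1 x hx))))
      (fun x hx => m4 x (m3 x (i2 x hx)))
      (fun x hx => m4 x (i3 x hx))
      (fun x hx => i4 x hx)

-- ===== VERDICT (by name: the statement is the Claim_ definition above) =====
theorem merge_graph_spec : Claim_equal_merge_graph := by
  intro graph_l root_l graph_r root_r _ _
  show merge_graph graph_l root_l graph_r root_r = merge_graph_alt graph_l root_l graph_r root_r
  simp only [merge_graph, merge_graph_alt, union_empty_left]
  exact (pvFold (pvReverse graph_l) (pvReverse graph_r)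
    (PySem.Dict.mk graph_l) (PySem.Dict.mk graph_r) _
    (PySem.Set.ofList (PySem.Set.inter (PySem.Set.ofList (graph_l.map Prod.fst))
      (PySem.Set.ofList (graph_r.map Prod.fst))))
    [] [] [] []
    (by intro v hv; simp at hv) (by intro v hv; simp at hv)
    (by intro v hv; simp at hv) (by intro v hv; simp at hv)
    (by intro x hx; simp at hx) (by intro x hx; simp at hx)
    (by intro x hx; simp at hx) (by intro x hx; simp at hx)).symm
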